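-- pv_equiv track=rewrite | github.com/zt0910/dp_scripy | shopid.py | recostution_url
-- ===== SOURCE A (Python) =====
-- def recostution_url(classfy_list, all_area):
--     Reurl = []
--     for classfy in classfy_list:
--         for data in all_area:
--             for region, regiondata in data.items():
--                 for area_id, area_name in regiondata:
--                     Reurl.append((region, area_name, area_id,
--                                   'http://m.dianping.com/shenzhen/ch10/' + 'g' + str(classfy) + 'r' + str(area_id)))
--     return Reurl
-- ===== SOURCE B (Python) =====
-- def recostution_url(classfy_list, all_area):
--     # Pre-flatten the area dicts once, then emit the Cartesian product.
--     areas = [(region, area_name, area_id)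
--              for data in all_area
--              for region, regiondata in data.items()
--              for area_id, area_name in regiondata]
--     return [(region, area_name, area_id,
--              'http://m.dianping.com/shenzhen/ch10/g' + str(classfy) + 'r' + str(area_id))
--             for classfy in classfy_list
--             for region, area_name, area_id in areas]
-- ===== Notes on version B (the rewrite author's own statement) =====
-- stated objective: simpler
-- what changed: B flattens the area dicts into one (region, name, id) list in a single pre-pass and then emits the Cartesian product with classfy_list as two comprehensions, instead of A's four-deep nested loop with an append accumulator repeated per classfy.
import Mathlib
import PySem

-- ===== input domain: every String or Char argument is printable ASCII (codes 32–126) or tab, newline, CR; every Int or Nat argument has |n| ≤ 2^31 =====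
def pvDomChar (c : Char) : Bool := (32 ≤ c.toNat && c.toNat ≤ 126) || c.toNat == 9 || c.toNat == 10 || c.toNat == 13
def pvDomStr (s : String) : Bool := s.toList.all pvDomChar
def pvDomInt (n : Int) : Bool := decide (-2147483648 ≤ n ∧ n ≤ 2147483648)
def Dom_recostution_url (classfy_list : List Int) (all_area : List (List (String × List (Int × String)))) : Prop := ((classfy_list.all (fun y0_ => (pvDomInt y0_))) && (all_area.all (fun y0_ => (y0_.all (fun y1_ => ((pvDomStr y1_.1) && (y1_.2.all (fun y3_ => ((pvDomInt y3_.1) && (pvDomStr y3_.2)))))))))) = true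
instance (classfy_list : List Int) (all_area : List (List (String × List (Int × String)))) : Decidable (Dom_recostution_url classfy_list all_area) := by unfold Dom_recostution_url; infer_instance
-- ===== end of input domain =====

-- B: flatten the area dicts in one pre-pass, then emit the classfy × area product as two flatMap/map passes (simpler decomposition; same cost).

-- ===== PORT A =====
def recostution_url (classfy_list : List Int) (all_area : List (List (String × List (Int × String)))) : List (String × String × Int × String) :=
  classfy_list.foldl (fun acc classfy =>
    all_area.foldl (fun acc data =>
      data.foldl (fun acc rr =>
        rr.2.foldl (fun acc an =>
          acc ++ [(rr.1, an.2, an.1,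
            (((("http://m.dianping.com/shenzhen/ch10/" ++ "g") ++ PySem.Int.toStr classfy) ++ "r") ++ PySem.Int.toStr an.1))]) acc) acc) acc) []

-- ===== PORT B =====
-- the flattening pre-pass: one (region, area_name, area_id) triple per area entry
def pvAreas (all_area : List (List (String × List (Int × String)))) : List (String × String × Int) :=
  all_area.flatMap (fun data => data.flatMap (fun rr => rr.2.map (fun an => (rr.1, an.2, an.1))))

def recostution_url_alt (classfy_list : List Int) (all_area : List (List (String × List (Int × String)))) : List (String × String × Int × String) :=
  let areas := pvAreas all_area
  classfy_list.flatMap (fun classfy => areas.map (fun t =>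
    (t.1, t.2.1, t.2.2,
      (("http://m.dianping.com/shenzhen/ch10/g" ++ PySem.Int.toStr classfy) ++ "r") ++ PySem.Int.toStr t.2.2)))

-- ===== PRECONDITION & SPEC =====
def Spec_recostution_url (classfy_list : List Int) (all_area : List (List (String × List (Int × String)))) (out : List (String × String × Int × String)) : Prop := out = recostution_url_alt classfy_list all_area
instance (classfy_list : List Int) (all_area : List (List (String × List (Int × String)))) (out : List (String × String × Int × String)) : Decidable (Spec_recostution_url classfy_list all_area out) := by unfold Spec_recostution_url; infer_instance

-- ===== CLAIM (what is proved, stated in full; the proofs are below) =====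
def Claim_equal_recostution_url : Prop := ∀ (classfy_list : List Int) (all_area : List (List (String × List (Int × String)))), Dom_recostution_url classfy_list all_area → Spec_recostution_url classfy_list all_area (recostution_url classfy_list all_area)

-- ===== LEMMAS AND PROOFS =====
theorem flatten_map_singleton {α β : Type} (f : α → β) (l : List α) :
    (l.map fun x => [f x]).flatten = l.map f := by
  induction l with
  | nil => rfl
  | cons a l ih => simp [ih]

-- ===== VERDICT (by name: the statement is the Claim_ definition above) =====
theorem recostution_url_spec : Claim_equal_recostution_url := by
  intro classfy_list all_area _
  unfold Spec_recostution_url recostution_url recostution_url_alt pvAreas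
  simp [List.flatMap_def, List.map_map, Function.comp_def, flatten_map_singleton]
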